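-- pv_equiv track=rewrite | github.com/B1kku/nand2tetris | projects/06/HackAssembler/InstructionAssembler.py | assemble_dest
-- ===== SOURCE A (Python) =====
-- D_POSITIONS = {"A": "0", "D": "1", "M": "2"}
--
-- def assemble_dest(dest):
--     '''
--     Translates destination bits into binary, determines where to store the ALU result.
--     d: string. Destination bits in a C instruction.
--     returns: string. Binary value of the destination bits or ERROR on failure.
--     '''
--     if not dest:
--         return "000"
--     D_bits = None
--     if len(set(dest)) != len(dest):
--         # Error, invalid dest_code, duplicate register dest.
--         return "ERRORd."
--     else:
--         D_bits = "000"
--         for d in dest: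
--             if d not in D_POSITIONS.keys():
--                 # Error, invalid dcode, dest is not a valid register.
--                 return "ERRORd."
--             # If register is a dest, take the position value in pins and set it to 1.
--             i = int(D_POSITIONS[d])
--             D_bits = D_bits[:i] + "1" + D_bits[i+1:]
--     return D_bits
-- ===== SOURCE B (Python) =====
-- def assemble_dest(dest):
--     if not dest:
--         return "000"
--     if len(set(dest)) != len(dest) or any(c not in "ADM" for c in dest):
--         return "ERRORd."
--     return (("1" if "A" in dest else "0")
--             + ("1" if "D" in dest else "0")
--             + ("1" if "M" in dest else "0"))
-- ===== Notes on version B (the rewrite author's own statement) =====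
-- stated objective: simpler
-- what changed: B computes each output bit independently by membership ('A'/'D'/'M' in dest) instead of A's loop that mutates a bit string by slicing at a position looked up (via int of a dict value) per input character.
import Mathlib
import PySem

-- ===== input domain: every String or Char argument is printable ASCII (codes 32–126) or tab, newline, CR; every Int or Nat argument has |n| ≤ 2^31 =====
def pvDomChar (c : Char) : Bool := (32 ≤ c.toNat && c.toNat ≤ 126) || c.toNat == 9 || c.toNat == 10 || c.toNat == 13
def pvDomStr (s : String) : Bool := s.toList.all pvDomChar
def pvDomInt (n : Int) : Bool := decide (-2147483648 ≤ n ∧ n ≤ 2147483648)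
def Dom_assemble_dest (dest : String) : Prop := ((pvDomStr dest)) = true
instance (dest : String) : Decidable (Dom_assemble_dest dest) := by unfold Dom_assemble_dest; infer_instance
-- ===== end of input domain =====

-- B computes each output bit independently by membership instead of A's per-character
-- loop that mutates a bit string by slicing at a dict-looked-up position (objective: simpler).

-- ===== PORT A =====
-- D_POSITIONS = {"A": "0", "D": "1", "M": "2"}  (keys iterated as the characters of dest)
def dPOSITIONS : PySem.Dict Char String :=
  PySem.Dict.ofList [('A', "0"), ('D', "1"), ('M', "2")]

-- the 'for d in dest' loop: early return "ERRORd." on an unknown register,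
-- else D_bits = D_bits[:i] + "1" + D_bits[i+1:]  (the bit string kept as List Char)
def assembleLoopA : List Char → List Char → String
  | [], bits => String.ofList bits
  | d :: rest, bits =>
    if dPOSITIONS.contains d = false then "ERRORd."
    else
      let i := (PySem.Int.ofStr? ((dPOSITIONS.get? d).getD "")).getD 0
      assembleLoopA rest
        (PySem.List.slice bits none (some i) ++ ['1'] ++ PySem.List.slice bits (some (i + 1)) none)

def assemble_dest (dest : String) : String :=
  if dest = "" then "000"
  else if (PySem.Set.ofList dest.toList).length ≠ dest.toList.length then "ERRORd."
  else assembleLoopA dest.toList "000".toList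

-- ===== PORT B =====
def assemble_dest_alt (dest : String) : String :=
  if dest = "" then "000"
  else if (PySem.Set.ofList dest.toList).length ≠ dest.toList.length
          ∨ dest.toList.any (fun c => !(("ADM".toList).contains c)) then "ERRORd."
  else String.ofList
    [ (if 'A' ∈ dest.toList then '1' else '0')
    , (if 'D' ∈ dest.toList then '1' else '0')
    , (if 'M' ∈ dest.toList then '1' else '0') ]

-- ===== PRECONDITION & SPEC =====
def Spec_assemble_dest (dest : String) (out : String) : Prop := out = assemble_dest_alt dest
instance (dest : String) (out : String) : Decidable (Spec_assemble_dest dest out) := by unfold Spec_assemble_dest; infer_instance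

-- ===== CLAIM (what is proved, stated in full; the proofs are below) =====
def Claim_equal_assemble_dest : Prop := ∀ (dest : String), Dom_assemble_dest dest → Spec_assemble_dest dest (assemble_dest dest)

-- ===== LEMMAS AND PROOFS =====
def pvBit (b : Bool) : Char := if b then '1' else '0'

lemma dpos_contains (c : Char) :
    dPOSITIONS.contains c = (c == 'A' || c == 'D' || c == 'M') := by
  have hk : dPOSITIONS.items = [('A', "0"), ('D', "1"), ('M', "2")] := by decide
  simp [PySem.Dict.contains, hk]
  simp [BEq.comm, Bool.or_assoc]

-- one loop step on a 3-character bit string, for each valid register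
lemma stepA_A (rest : List Char) (x y z : Char) :
    assembleLoopA ('A' :: rest) [x, y, z] = assembleLoopA rest ['1', y, z] := by
  simp only [assembleLoopA]
  rw [if_neg (by decide), show (PySem.Int.ofStr? ((dPOSITIONS.get? 'A').getD "")).getD 0 = 0 from by decide]
  norm_num [PySem.List.slice_to, PySem.List.slice_from]

lemma stepA_D (rest : List Char) (x y z : Char) :
    assembleLoopA ('D' :: rest) [x, y, z] = assembleLoopA rest [x, '1', z] := by
  simp only [assembleLoopA]
  rw [if_neg (by decide), show (PySem.Int.ofStr? ((dPOSITIONS.get? 'D').getD "")).getD 0 = 1 from by decide]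
  norm_num [PySem.List.slice_to, PySem.List.slice_from, show (Int.toNat 2) = 2 from rfl]

lemma stepA_M (rest : List Char) (x y z : Char) :
    assembleLoopA ('M' :: rest) [x, y, z] = assembleLoopA rest [x, y, '1'] := by
  simp only [assembleLoopA]
  rw [if_neg (by decide), show (PySem.Int.ofStr? ((dPOSITIONS.get? 'M').getD "")).getD 0 = 2 from by decide]
  norm_num [PySem.List.slice_to, PySem.List.slice_from, show (Int.toNat 2) = 2 from rfl,
            show (Int.toNat 3) = 3 from rfl]

-- if some character of l is not a valid register, A's loop returns the error string
lemma loopA_err (l : List Char) (bits : List Char)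
    (h : ∃ c ∈ l, ¬(c = 'A' ∨ c = 'D' ∨ c = 'M')) :
    assembleLoopA l bits = "ERRORd." := by
  induction l generalizing bits with
  | nil => simp at h
  | cons c rest ih =>
    rcases h with ⟨x, hx, hbad⟩
    by_cases hc : c = 'A' ∨ c = 'D' ∨ c = 'M'
    · have hxr : x ∈ rest := by
        rcases List.mem_cons.mp hx with rfl | hr
        · exact absurd hc hbad
        · exact hr
      have hcon : ¬(dPOSITIONS.contains c = false) := by
        rcases hc with rfl | rfl | rfl <;> decide
      simp only [assembleLoopA, if_neg hcon]
      exact ih _ ⟨x, hxr, hbad⟩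
    · have hcon : dPOSITIONS.contains c = false := by
        rw [dpos_contains]
        push Not at hc
        simp [hc.1, hc.2.1, hc.2.2]
      simp only [assembleLoopA, if_pos hcon]

-- loop invariant: over valid registers the loop ORs each bit with membership
lemma loopA_inv (l : List Char) (h : ∀ c ∈ l, c = 'A' ∨ c = 'D' ∨ c = 'M')
    (a d m : Bool) :
    assembleLoopA l [pvBit a, pvBit d, pvBit m]
      = String.ofList [pvBit (a || l.contains 'A'), pvBit (d || l.contains 'D'),
                       pvBit (m || l.contains 'M')] := by
  induction l generalizing a d m with
  | nil => simp [assembleLoopA]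
  | cons c rest ih =>
    have hrest : ∀ x ∈ rest, x = 'A' ∨ x = 'D' ∨ x = 'M' :=
      fun x hx => h x (List.mem_cons_of_mem _ hx)
    rcases h c List.mem_cons_self with rfl | rfl | rfl
    · rw [stepA_A, show ('1' : Char) = pvBit true from rfl, ih hrest]
      simp
    · rw [stepA_D, show ('1' : Char) = pvBit true from rfl, ih hrest]
      simp
    · rw [stepA_M, show ('1' : Char) = pvBit true from rfl, ih hrest]
      simp

-- ===== VERDICT (by name: the statement is the Claim_ definition above) =====
theorem assemble_dest_spec : Claim_equal_assemble_dest := by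
  intro dest _
  unfold Spec_assemble_dest assemble_dest assemble_dest_alt
  by_cases h0 : dest = ""
  · rw [if_pos h0, if_pos h0]
  · rw [if_neg h0, if_neg h0]
    by_cases hdup : (PySem.Set.ofList dest.toList).length ≠ dest.toList.length
    · rw [if_pos hdup, if_pos (Or.inl hdup)]
    · rw [if_neg hdup]
      by_cases hval : ∀ c ∈ dest.toList, c = 'A' ∨ c = 'D' ∨ c = 'M'
      · have hany : (dest.toList.any fun c => !(("ADM".toList).contains c)) = false := by
          simp only [List.any_eq_false]
          intro c hc
          rcases hval c hc with rfl | rfl | rfl <;> decide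
        rw [if_neg (by
          rintro (h | h)
          · exact hdup h
          · rw [hany] at h; exact Bool.false_ne_true h)]
        rw [show ("000".toList : List Char) = [pvBit false, pvBit false, pvBit false] from by decide]
        rw [loopA_inv dest.toList hval false false false]
        simp [pvBit]
      · push Not at hval
        have hany : (dest.toList.any fun c => !(("ADM".toList).contains c)) = true := by
          rcases hval with ⟨x, hx, hbad⟩
          refine List.any_eq_true.mpr ⟨x, hx, ?_⟩
          simp [hbad.1, hbad.2.1, hbad.2.2]
        have hbadE : ∃ c ∈ dest.toList, ¬(c = 'A' ∨ c = 'D' ∨ c = 'M') := by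
          rcases hval with ⟨x, hx, hbad⟩
          exact ⟨x, hx, by simp [hbad.1, hbad.2.1, hbad.2.2]⟩
        rw [loopA_err dest.toList _ hbadE, if_pos (Or.inr hany)]
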